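-- pv_equiv track=rewrite | github.com/franzenjb/nonprofit-partner-finder | api/census_geo_search.py | is_likely_same_county
-- ===== SOURCE A (Python) =====
-- def is_likely_same_county(org_city, search_city, state):
--     """Heuristic to guess if cities are in same county"""
--     # Major metro areas where nearby cities are likely same county
--     metro_areas = {
--         'TX': {
--             'Dallas': ['Richardson', 'Plano', 'Irving', 'Garland', 'Mesquite', 'Addison'],
--             'Houston': ['Pasadena', 'Sugar Land', 'Katy', 'Spring', 'The Woodlands'],
--             'Fort Worth': ['Arlington', 'Euless', 'Bedford', 'North Richland Hills'],
--         },
--         'FL': {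
--             'St Petersburg': ['Clearwater', 'Largo', 'Pinellas Park', 'Seminole'],
--             'Miami': ['Miami Beach', 'Coral Gables', 'Hialeah', 'Aventura'],
--             'Tampa': ['Brandon', 'Riverview', 'Plant City', 'Temple Terrace'],
--         },
--         'CA': {
--             'Los Angeles': ['Hollywood', 'Beverly Hills', 'Santa Monica', 'Pasadena'],
--             'San Diego': ['Chula Vista', 'Oceanside', 'Carlsbad', 'El Cajon'],
--         }
--     }
--
--     state_metros = metro_areas.get(state, {})
--     for metro_city, nearby_cities in state_metros.items():
--         if search_city.lower() == metro_city.lower() or search_city in nearby_cities: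
--             if org_city in nearby_cities or org_city.lower() == metro_city.lower():
--                 return True
--
--     return False
-- ===== SOURCE B (Python) =====
-- def is_likely_same_county(org_city, search_city, state):
--     """Heuristic to guess if cities are in same county"""
--     metro_areas = {
--         'TX': {
--             'Dallas': ['Richardson', 'Plano', 'Irving', 'Garland', 'Mesquite', 'Addison'],
--             'Houston': ['Pasadena', 'Sugar Land', 'Katy', 'Spring', 'The Woodlands'],
--             'Fort Worth': ['Arlington', 'Euless', 'Bedford', 'North Richland Hills'],
--         },
--         'FL': {
--             'St Petersburg': ['Clearwater', 'Largo', 'Pinellas Park', 'Seminole'],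
--             'Miami': ['Miami Beach', 'Coral Gables', 'Hialeah', 'Aventura'],
--             'Tampa': ['Brandon', 'Riverview', 'Plant City', 'Temple Terrace'],
--         },
--         'CA': {
--             'Los Angeles': ['Hollywood', 'Beverly Hills', 'Santa Monica', 'Pasadena'],
--             'San Diego': ['Chula Vista', 'Oceanside', 'Carlsbad', 'El Cajon'],
--         }
--     }
--
--     # Build a reverse index once: every city string (metro name lowercased,
--     # nearby cities exact) maps to the id of its metro group.
--     index = {}
--     gid = 0
--     for metro_city, nearby_cities in metro_areas.get(state, {}).items():
--         index[metro_city.lower()] = gid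
--         for c in nearby_cities:
--             index[c] = gid
--         gid += 1
--
--     def lookup(city):
--         g = index.get(city)
--         return g if g is not None else index.get(city.lower())
--
--     g = lookup(search_city)
--     return g is not None and g == lookup(org_city)
-- ===== Notes on version B (the rewrite author's own statement) =====
-- stated objective: alternative
-- what changed: A's per-group loop that tests both cities against each metro group is replaced by building a reverse index (city string -> metro-group id, metro names lowercased, nearby cities exact) in one pass and then comparing two direct lookups (exact key first, then lowercased key) for equality.
import Mathlib
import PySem

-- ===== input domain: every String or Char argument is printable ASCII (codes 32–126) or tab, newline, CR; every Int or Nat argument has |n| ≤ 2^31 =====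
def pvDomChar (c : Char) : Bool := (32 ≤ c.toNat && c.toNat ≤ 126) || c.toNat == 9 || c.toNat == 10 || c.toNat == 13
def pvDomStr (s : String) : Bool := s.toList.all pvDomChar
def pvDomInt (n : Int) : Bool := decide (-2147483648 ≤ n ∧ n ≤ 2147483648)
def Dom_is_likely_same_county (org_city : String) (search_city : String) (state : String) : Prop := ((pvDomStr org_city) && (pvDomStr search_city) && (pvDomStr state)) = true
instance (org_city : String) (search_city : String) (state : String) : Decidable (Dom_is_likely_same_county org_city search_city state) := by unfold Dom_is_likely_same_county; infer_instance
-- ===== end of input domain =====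

-- B replaces A's per-group nested double-membership scan by a reverse index (city string -> metro-group id)
-- built in one pass, followed by two direct lookups compared for equality (objective: alternative structure, same cost on this fixed table).

-- the literal metro_areas table both Python sources carry verbatim (shared data, no logic)
def pvMetroAreas : PySem.Dict String (List (String × List String)) :=
  PySem.Dict.ofList [
    ("TX", [("Dallas", ["Richardson", "Plano", "Irving", "Garland", "Mesquite", "Addison"]),
            ("Houston", ["Pasadena", "Sugar Land", "Katy", "Spring", "The Woodlands"]),
            ("Fort Worth", ["Arlington", "Euless", "Bedford", "North Richland Hills"])]),
    ("FL", [("St Petersburg", ["Clearwater", "Largo", "Pinellas Park", "Seminole"]),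
            ("Miami", ["Miami Beach", "Coral Gables", "Hialeah", "Aventura"]),
            ("Tampa", ["Brandon", "Riverview", "Plant City", "Temple Terrace"])]),
    ("CA", [("Los Angeles", ["Hollywood", "Beverly Hills", "Santa Monica", "Pasadena"]),
            ("San Diego", ["Chula Vista", "Oceanside", "Carlsbad", "El Cajon"])])]

-- ===== PORT A =====
-- the for-loop with early `return True`, one step per (metro_city, nearby_cities) item
def pvScanA (org_city : String) (search_city : String) : List (String × List String) → Bool
  | [] => false
  | (metro_city, nearby_cities) :: rest =>
      if (PySem.Str.lower search_city == PySem.Str.lower metro_city || nearby_cities.contains search_city) then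
        if (nearby_cities.contains org_city || PySem.Str.lower org_city == PySem.Str.lower metro_city) then true
        else pvScanA org_city search_city rest
      else pvScanA org_city search_city rest

def is_likely_same_county (org_city : String) (search_city : String) (state : String) : Bool :=
  pvScanA org_city search_city (pvMetroAreas.getD state [])

-- ===== PORT B =====
-- index-building loop of Source B: metro_city.lower() and each nearby city map to the running group id
def pvBuildIndex : List (String × List String) → Int → PySem.Dict String Int → PySem.Dict String Int
  | [], _, index => index
  | (metro_city, nearby_cities) :: rest, gid, index =>
      pvBuildIndex rest (gid + 1)
        (nearby_cities.foldl (fun d c => d.insert c gid) (index.insert (PySem.Str.lower metro_city) gid))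

-- Source B's lookup: exact key first, then the lowercased form
def pvLookup (index : PySem.Dict String Int) (city : String) : Option Int :=
  match index.get? city with
  | some g => some g
  | none => index.get? (PySem.Str.lower city)

def is_likely_same_county_alt (org_city : String) (search_city : String) (state : String) : Bool :=
  let index := pvBuildIndex (pvMetroAreas.getD state []) 0 PySem.Dict.empty
  match pvLookup index search_city with
  | none => false
  | some g => pvLookup index org_city == some g

-- ===== PRECONDITION & SPEC =====
def Spec_is_likely_same_county (org_city : String) (search_city : String) (state : String) (out : Bool) : Prop := out = is_likely_same_county_alt org_city search_city state
instance (org_city : String) (search_city : String) (state : String) (out : Bool) : Decidable (Spec_is_likely_same_county org_city search_city state out) := by unfold Spec_is_likely_same_county; infer_instance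

-- ===== CLAIM (what is proved, stated in full; the proofs are below) =====
def Claim_equal_is_likely_same_county : Prop := ∀ (org_city : String) (search_city : String) (state : String), Dom_is_likely_same_county org_city search_city state → Spec_is_likely_same_county org_city search_city state (is_likely_same_county org_city search_city state)

-- ===== LEMMAS AND PROOFS =====

-- the index keys contributed by one group, and A's per-group match test for one city
def pvKeys (g : String × List String) : List String := PySem.Str.lower g.1 :: g.2
def pvMatch (c : String) (g : String × List String) : Bool :=
  PySem.Str.lower c == PySem.Str.lower g.1 || g.2.contains c

-- sanity conditions of the metro table (checked by `decide` on each state's literal list):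
-- all index keys distinct; no nearby city's lowercase equals a metro's lowercase; no nearby city is lowercase-fixed
def pvHyp (gs : List (String × List String)) : Prop :=
  (gs.flatMap pvKeys).Nodup ∧
  (∀ g ∈ gs, ∀ w ∈ g.2, ∀ g' ∈ gs, PySem.Str.lower w ≠ PySem.Str.lower g'.1) ∧
  (∀ g ∈ gs, ∀ w ∈ g.2, PySem.Str.lower w ≠ w)

theorem pvCharLe_toNat {a b : Char} (h : a ≤ b) : a.toNat ≤ b.toNat := Fin.mk_le_mk.mp h

theorem pvLowerChar_idem (a : Char) :
    PySem.Chars.lowerChar (PySem.Chars.lowerChar a) = PySem.Chars.lowerChar a := by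
  simp only [PySem.Chars.lowerChar, PySem.Chars.isupper]
  split_ifs with h1 h2
  · exfalso
    simp only [Bool.and_eq_true, decide_eq_true_eq] at h1 h2
    have hA : 65 ≤ a.toNat := by have := pvCharLe_toNat h1.1; simpa using this
    have hZ : a.toNat ≤ 90 := by have := pvCharLe_toNat h1.2; simpa using this
    have hval : Nat.isValidChar (a.toNat + 32) := Or.inl (by omega)
    have ht : (Char.ofNat (a.toNat + 32)).toNat = a.toNat + 32 := by
      rw [Char.toNat_ofNat, if_pos hval]
    have hZ2 : (Char.ofNat (a.toNat + 32)).toNat ≤ 90 := by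
      have := pvCharLe_toNat h2.2; simpa using this
    omega
  · rfl
  · rfl

theorem pvLower_idem (s : String) :
    PySem.Str.lower (PySem.Str.lower s) = PySem.Str.lower s := by
  simp [PySem.Str.lower, PySem.Chars.lower, Function.comp_def, pvLowerChar_idem]

-- A's early-return scan is an `any` over the groups
theorem pvScanA_eq_any (o s : String) (gs : List (String × List String)) :
    pvScanA o s gs = gs.any (fun g => pvMatch s g && pvMatch o g) := by
  induction gs with
  | nil => rfl
  | cons g rest ih =>
      obtain ⟨m, nb⟩ := g
      rw [List.any_cons, ← ih]
      show (if (PySem.Str.lower s == PySem.Str.lower m || nb.contains s) then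
              (if (nb.contains o || PySem.Str.lower o == PySem.Str.lower m) then true
               else pvScanA o s rest)
            else pvScanA o s rest) =
           ((pvMatch s (m, nb) && pvMatch o (m, nb)) || pvScanA o s rest)
      cases hs : (PySem.Str.lower s == PySem.Str.lower m || nb.contains s) <;>
        cases ho : (nb.contains o || PySem.Str.lower o == PySem.Str.lower m) <;>
          simp [pvMatch, Bool.or_comm] <;>
            simp [Bool.or_comm] at hs ho <;> simp [hs, ho]

-- get? after inserting every element of ws with the same value v
theorem pvGet_foldl_insert (ws : List String) (d : PySem.Dict String Int) (v : Int) (k : String) :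
    (ws.foldl (fun d c => d.insert c v) d).get? k = if k ∈ ws then some v else d.get? k := by
  induction ws generalizing d with
  | nil => simp
  | cons w rest ih =>
      simp only [List.foldl_cons, ih, List.mem_cons]
      by_cases hk : k ∈ rest
      · simp [hk]
      · by_cases hw : k = w
        · subst hw; simp [hk, PySem.Dict.get?_insert_self]
        · simp [hk, hw, PySem.Dict.get?_insert_of_ne _ _ hw]

-- get? of the built index, described by the first group whose keys contain k
theorem pvGet_build (gs : List (String × List String)) (gid : Int) (d : PySem.Dict String Int)
    (k : String) (hnd : (gs.flatMap pvKeys).Nodup) :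
    (pvBuildIndex gs gid d).get? k =
      match gs.findIdx? (fun g => (pvKeys g).contains k) with
      | some i => some (gid + (i : Int))
      | none => d.get? k := by
  induction gs generalizing gid d with
  | nil => simp [pvBuildIndex]
  | cons g rest ih =>
      obtain ⟨m, nb⟩ := g
      simp only [List.flatMap_cons, List.nodup_append] at hnd
      obtain ⟨hndg, hndr, hdisj⟩ := hnd
      rw [List.findIdx?_cons]
      by_cases hk : (pvKeys (m, nb)).contains k
      · -- k is a key of the head group; by Nodup it occurs in no later group
        have hnone : rest.findIdx? (fun g => (pvKeys g).contains k) = none := by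
          rw [List.findIdx?_eq_none_iff]
          intro g' hg'
          by_contra hcon
          simp only [Bool.not_eq_false, List.contains_eq_mem, decide_eq_true_eq] at hcon
          have hkmem : k ∈ rest.flatMap pvKeys := List.mem_flatMap.mpr ⟨g', hg', hcon⟩
          have hhead : k ∈ pvKeys (m, nb) := by simpa using hk
          exact hdisj k hhead k hkmem rfl
        show (pvBuildIndex rest (gid+1) _).get? k = _
        rw [ih _ _ hndr, hnone, if_pos hk]
        rw [pvGet_foldl_insert]
        simp only [pvKeys, List.contains_eq_mem, List.mem_cons, decide_eq_true_eq] at hk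
        rcases hk with hk | hk
        · by_cases hnb : k ∈ nb
          · simp [hnb]
          · simp [hk, PySem.Dict.get?_insert_self]
        · simp [hk]
      · -- k not a key of the head group
        rw [if_neg hk]
        show (pvBuildIndex rest (gid+1) _).get? k = _
        rw [ih _ _ hndr]
        simp only [pvKeys, List.contains_eq_mem, List.mem_cons, decide_eq_true_eq] at hk
        push Not at hk
        cases hfi : rest.findIdx? (fun g => (pvKeys g).contains k) with
        | some i => simp; omega
        | none =>
            simp only [Option.map_none]
            rw [pvGet_foldl_insert, if_neg hk.2, PySem.Dict.get?_insert_of_ne _ _ hk.1]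

-- the tail of a sane table is sane
theorem pvHyp_tail {g : String × List String} {rest : List (String × List String)}
    (h : pvHyp (g :: rest)) : pvHyp rest := by
  obtain ⟨h1, h2, h3⟩ := h
  refine ⟨?_, ?_, ?_⟩
  · simp only [List.flatMap_cons, List.nodup_append] at h1; exact h1.2.1
  · intro ga hga w hw gb hgb
    exact h2 ga (List.mem_cons_of_mem _ hga) w hw gb (List.mem_cons_of_mem _ hgb)
  · intro ga hga w hw
    exact h3 ga (List.mem_cons_of_mem _ hga) w hw

-- a city matching the head group matches no group of the tail
theorem pvNoTail {g : String × List String} {rest : List (String × List String)}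
    (h : pvHyp (g :: rest)) (c : String) (hc : pvMatch c g = true) :
    ∀ g' ∈ rest, pvMatch c g' = false := by
  obtain ⟨h1, h2, h3⟩ := h
  simp only [List.flatMap_cons, List.nodup_append] at h1
  obtain ⟨-, -, hdisj⟩ := h1
  intro g' hg'
  by_contra hcon
  simp only [Bool.not_eq_false] at hcon
  simp only [pvMatch, Bool.or_eq_true, beq_iff_eq, List.contains_eq_mem,
    decide_eq_true_eq] at hc hcon
  rcases hc with hc | hc <;> rcases hcon with hh | hh
  · have hkey : PySem.Str.lower g'.1 ∈ rest.flatMap pvKeys :=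
      List.mem_flatMap.mpr ⟨g', hg', by simp [pvKeys]⟩
    exact hdisj (PySem.Str.lower g.1) (by simp [pvKeys]) (PySem.Str.lower g'.1) hkey
      (by rw [← hc, hh])
  · exact absurd hc (h2 g' (List.mem_cons_of_mem _ hg') c hh g (List.mem_cons_self))
  · exact absurd hh (h2 g (List.mem_cons_self) c hc g' (List.mem_cons_of_mem _ hg'))
  · have hkey : c ∈ rest.flatMap pvKeys := List.mem_flatMap.mpr ⟨g', hg', by simp [pvKeys, hh]⟩
    exact hdisj c (by simp [pvKeys, hc]) c hkey rfl

-- B's two-phase lookup (exact, then lowercased) finds exactly the first group A's test matches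
theorem pvLkNat (gs : List (String × List String)) (c : String) (h : pvHyp gs) :
    (match gs.findIdx? (fun g => (pvKeys g).contains c) with
     | some i => some i
     | none => gs.findIdx? (fun g => (pvKeys g).contains (PySem.Str.lower c))) =
    gs.findIdx? (fun g => pvMatch c g) := by
  induction gs with
  | nil => rfl
  | cons g rest ih =>
      have hT := pvHyp_tail h
      obtain ⟨h1, h2, h3⟩ := h
      simp only [List.flatMap_cons, List.nodup_append] at h1
      obtain ⟨-, hndr, hdisj⟩ := h1
      rw [List.findIdx?_cons, List.findIdx?_cons, List.findIdx?_cons]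
      by_cases hk : ((pvKeys g).contains c = true)
      · have hm : pvMatch c g = true := by
          simp only [pvKeys, List.contains_eq_mem, List.mem_cons, decide_eq_true_eq] at hk
          rcases hk with hk | hk
          · simp [pvMatch, hk, pvLower_idem]
          · simp [pvMatch, hk]
        rw [if_pos hk, if_pos hm]
      · rw [if_neg hk]
        simp only [pvKeys, List.contains_eq_mem, List.mem_cons, decide_eq_true_eq] at hk
        push Not at hk
        by_cases hl : ((pvKeys g).contains (PySem.Str.lower c) = true)
        · -- the lowercased form hits the head's metro key
          have hlm : PySem.Str.lower c = PySem.Str.lower g.1 := by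
            simp only [pvKeys, List.contains_eq_mem, List.mem_cons, decide_eq_true_eq] at hl
            rcases hl with hl | hl
            · exact hl
            · exact absurd (pvLower_idem c) (by
                have := h3 g (List.mem_cons_self) (PySem.Str.lower c) hl
                simpa using this)
          have hm : pvMatch c g = true := by simp [pvMatch, hlm]
          have hnone : rest.findIdx? (fun g => (pvKeys g).contains c) = none := by
            rw [List.findIdx?_eq_none_iff]
            intro g' hg'
            by_contra hcon
            simp only [Bool.not_eq_false, List.contains_eq_mem, pvKeys, List.mem_cons,
              decide_eq_true_eq] at hcon
            rcases hcon with hc' | hc'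
            · -- c is a later metro key: its lowercase equals both heads' lowers, Nodup contra
              have hkey : PySem.Str.lower g'.1 ∈ rest.flatMap pvKeys :=
                List.mem_flatMap.mpr ⟨g', hg', by simp [pvKeys]⟩
              refine hdisj (PySem.Str.lower g.1) (by simp [pvKeys]) (PySem.Str.lower g'.1) hkey ?_
              rw [← hlm, hc', pvLower_idem]
            · -- c is a later nearby city: its lowercase cannot be a metro's lowercase
              exact absurd hlm
                (h2 g' (List.mem_cons_of_mem _ hg') c hc' g (List.mem_cons_self))
          rw [hnone, if_pos hl, if_pos hm]
          rfl
        · have hm : pvMatch c g = false := by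
            simp only [pvKeys, List.contains_eq_mem, List.mem_cons, decide_eq_true_eq] at hl
            push Not at hl
            simp [pvMatch, hl.1, hk.2]
          rw [if_neg hl, if_neg (by simp [hm] : ¬ (pvMatch c g = true))]
          rw [← ih hT]
          cases rest.findIdx? (fun g => (pvKeys g).contains c) <;> simp

theorem pvLookup_build (gs : List (String × List String)) (c : String) (h : pvHyp gs) :
    pvLookup (pvBuildIndex gs 0 PySem.Dict.empty) c =
      (gs.findIdx? (fun g => pvMatch c g)).map (fun n => (n : Int)) := by
  unfold pvLookup
  rw [pvGet_build _ _ _ _ h.1, pvGet_build _ _ _ _ h.1, ← pvLkNat gs c h]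
  cases gs.findIdx? (fun g => (pvKeys g).contains c) with
  | some i => simp
  | none =>
      simp only
      cases gs.findIdx? (fun g => (pvKeys g).contains (PySem.Str.lower c)) <;>
        simp [PySem.Dict.get?, PySem.Dict.empty]

-- `any (both match)` equals `first match of s = first match of o` on a sane table
theorem pvAny_eq_B (gs : List (String × List String)) (o s : String) (h : pvHyp gs) :
    gs.any (fun g => pvMatch s g && pvMatch o g) =
      (match gs.findIdx? (fun g => pvMatch s g) with
       | none => false
       | some i => gs.findIdx? (fun g => pvMatch o g) == some i) := by
  induction gs with
  | nil => rfl
  | cons g rest ih =>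
      have hT := pvHyp_tail h
      rw [List.any_cons, List.findIdx?_cons, List.findIdx?_cons]
      cases hs : pvMatch s g <;> cases ho : pvMatch o g
      · -- neither city matches the head: both sides step to the tail
        rw [ih hT]
        simp only [Bool.false_and, Bool.false_or, Bool.false_eq_true, if_false]
        cases rest.findIdx? (fun g => pvMatch s g) <;>
          cases rest.findIdx? (fun g => pvMatch o g) <;> simp
      · -- only org matches the head; search matches nothing later either
        have hanyf : rest.any (fun g => pvMatch s g && pvMatch o g) = false := by
          rw [List.any_eq_false]
          intro g' hg'
          simp [pvNoTail h o ho g' hg']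
        simp only [Bool.false_and, Bool.false_or, Bool.false_eq_true, if_false, hanyf]
        cases rest.findIdx? (fun g => pvMatch s g) <;> simp
      · -- only search matches the head; org matches nothing later either
        have hanyf : rest.any (fun g => pvMatch s g && pvMatch o g) = false := by
          rw [List.any_eq_false]
          intro g' hg'
          simp [pvNoTail h s hs g' hg']
        simp only [Bool.true_and, Bool.false_eq_true, if_false, hanyf]
        cases rest.findIdx? (fun g => pvMatch o g) <;> simp
      · -- both match the head group
        simp

theorem pvBridge (o s : String) (gs : List (String × List String)) (h : pvHyp gs) :
    pvScanA o s gs =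
      (match pvLookup (pvBuildIndex gs 0 PySem.Dict.empty) s with
       | none => false
       | some g => pvLookup (pvBuildIndex gs 0 PySem.Dict.empty) o == some g) := by
  rw [pvScanA_eq_any, pvLookup_build _ _ h, pvLookup_build _ _ h, pvAny_eq_B _ _ _ h]
  cases hs : gs.findIdx? (fun g => pvMatch s g) with
  | none => rfl
  | some i =>
      cases ho : gs.findIdx? (fun g => pvMatch o g) with
      | none => rfl
      | some j => simp

-- ===== VERDICT (by name: the statement is the Claim_ definition above) =====
theorem is_likely_same_county_spec : Claim_equal_is_likely_same_county := by
  intro o s st _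
  unfold Spec_is_likely_same_county is_likely_same_county is_likely_same_county_alt
  by_cases h1 : st = "TX"
  · subst h1; exact pvBridge o s _ (by unfold pvHyp pvKeys; decide)
  by_cases h2 : st = "FL"
  · subst h2; exact pvBridge o s _ (by unfold pvHyp pvKeys; decide)
  by_cases h3 : st = "CA"
  · subst h3; exact pvBridge o s _ (by unfold pvHyp pvKeys; decide)
  have hnil : pvMetroAreas.getD st [] = [] := by
    have hmk : pvMetroAreas = PySem.Dict.mk
        [("TX", [("Dallas", ["Richardson", "Plano", "Irving", "Garland", "Mesquite", "Addison"]),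
                 ("Houston", ["Pasadena", "Sugar Land", "Katy", "Spring", "The Woodlands"]),
                 ("Fort Worth", ["Arlington", "Euless", "Bedford", "North Richland Hills"])]),
         ("FL", [("St Petersburg", ["Clearwater", "Largo", "Pinellas Park", "Seminole"]),
                 ("Miami", ["Miami Beach", "Coral Gables", "Hialeah", "Aventura"]),
                 ("Tampa", ["Brandon", "Riverview", "Plant City", "Temple Terrace"])]),
         ("CA", [("Los Angeles", ["Hollywood", "Beverly Hills", "Santa Monica", "Pasadena"]),
                 ("San Diego", ["Chula Vista", "Oceanside", "Carlsbad", "El Cajon"])])] := by rfl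
    simp [hmk, PySem.Dict.getD, PySem.Dict.get?,
      Ne.symm h1, Ne.symm h2, Ne.symm h3]
  rw [hnil]
  exact pvBridge o s [] (by unfold pvHyp pvKeys; decide)
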